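-- pv_equiv track=rewrite | github.com/ardeshireshghi/python-algo | algo.py | find_connected_airports
-- ===== SOURCE A (Python) =====
-- def find_connected_airports(airport, routes, result):
--     immidiate_connections = [
--         route for route in routes if route[0] == airport and route[1] not in result]
--     if len(immidiate_connections) > 0:
--         for _, dest in immidiate_connections:
--             result.append(dest)
--             find_connected_airports(dest, routes, result)
--
--     unique_result = set([item for item in result if item != airport])
--     return unique_result
-- ===== SOURCE B (Python) =====
-- def find_connected_airports(airport, routes, result):
--     adj = {}
--     for src, dst in routes:
--         adj.setdefault(src, []).append(dst)
--     seen = set(result)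
--     out = []
--     stack = list(adj.get(airport, []))
--     while stack:
--         u = stack[0]
--         if u in seen:
--             stack = stack[1:]
--         else:
--             seen.add(u)
--             out.append(u)
--             stack = adj.get(u, []) + stack[1:]
--     return set(x for x in result + out if x != airport)
-- ===== Notes on version B (the rewrite author's own statement) =====
-- stated objective: alternative
-- what changed: A recursively rescans the whole routes list and does linear membership tests on the growing result list in every call; B builds an adjacency dict once and runs a single explicit-stack DFS over a visited set, then forms the same set.
import Mathlib
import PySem

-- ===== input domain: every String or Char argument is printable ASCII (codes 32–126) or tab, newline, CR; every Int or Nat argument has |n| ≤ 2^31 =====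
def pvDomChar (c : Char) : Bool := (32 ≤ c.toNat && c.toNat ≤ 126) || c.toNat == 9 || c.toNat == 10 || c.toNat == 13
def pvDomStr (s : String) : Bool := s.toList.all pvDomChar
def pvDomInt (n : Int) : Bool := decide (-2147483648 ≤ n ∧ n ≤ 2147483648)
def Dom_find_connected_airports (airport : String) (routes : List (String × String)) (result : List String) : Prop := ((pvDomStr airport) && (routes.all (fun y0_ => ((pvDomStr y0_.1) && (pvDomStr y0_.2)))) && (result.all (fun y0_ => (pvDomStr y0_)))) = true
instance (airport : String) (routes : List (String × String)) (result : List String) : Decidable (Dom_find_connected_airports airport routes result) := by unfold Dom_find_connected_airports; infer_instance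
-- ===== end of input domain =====

-- B replaces A's recursion with per-call rescans of `routes` and membership tests on the growing
-- `result` list by an adjacency dict built once plus an explicit-stack DFS over a visited set
-- (objective: alternative). Python A mutates its `result` argument in place and B does not;
-- the equivalence proved here is about the RETURN value only.

-- ===== PORT A =====
-- A is recursive and mutates `result`; the port threads the list as explicit state (pvGoA /
-- pvLoopA) and applies the final set() at top level (A discards inner calls' return values).
-- The Nat fuel is a totality device only: one unit per recursion level; the level count is
-- bounded by the number of distinct route destinations (proved below), so the fuel passed in
-- find_connected_airports never runs out.
mutual
def pvGoA (routes : List (String × String)) : Nat → String → List String → List String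
  | 0, _, res => res
  | f + 1, airport, res =>
    let imm := routes.filter (fun route => route.1 == airport && !(res.contains route.2))
    if imm.length > 0 then pvLoopA routes f imm res else res
  termination_by f _ _ => (f, 0)

def pvLoopA (routes : List (String × String)) : Nat → List (String × String) → List String → List String
  | _, [], res => res
  | f, (_, dest) :: rest, res => pvLoopA routes f rest (pvGoA routes f dest (res ++ [dest]))
  termination_by f l _ => (f, l.length + 1)
end

def find_connected_airports (airport : String) (routes : List (String × String)) (result : List String) : List String :=
  let final := pvGoA routes ((PySem.List.dedup (routes.map Prod.snd)).length + 1) airport result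
  PySem.Set.ofList (final.filter (fun item => !(item == airport)))

-- ===== PORT B =====
-- adj = {}; for src, dst in routes: adj.setdefault(src, []).append(dst)
def pvAdjDict (routes : List (String × String)) : PySem.Dict String (List String) :=
  routes.foldl (fun adj r => adj.insert r.1 (adj.getD r.1 [] ++ [r.2])) PySem.Dict.empty

-- the while loop; the fuel is again only a totality device (bound proved sufficient below)
def pvLoopB (adj : PySem.Dict String (List String)) : Nat → PySem.Set String → List String → List String → List String
  | 0, _, out, _ => out
  | _ + 1, _, out, [] => out
  | f + 1, seen, out, u :: rest =>
    if seen.contains u then pvLoopB adj f seen out rest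
    else pvLoopB adj f (seen.add u) (out ++ [u]) (adj.getD u [] ++ rest)

def find_connected_airports_alt (airport : String) (routes : List (String × String)) (result : List String) : List String :=
  let adj := pvAdjDict routes
  let seen : PySem.Set String := PySem.Set.ofList result
  let out := pvLoopB adj ((routes.length + 1) * (routes.length + 1)) seen [] (adj.getD airport [])
  PySem.Set.ofList ((result ++ out).filter (fun x => !(x == airport)))

-- ===== PRECONDITION & SPEC =====
def Spec_find_connected_airports (airport : String) (routes : List (String × String)) (result : List String) (out : List String) : Prop := out = find_connected_airports_alt airport routes result
instance (airport : String) (routes : List (String × String)) (result : List String) (out : List String) : Decidable (Spec_find_connected_airports airport routes result out) := by unfold Spec_find_connected_airports; infer_instance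

-- ===== CLAIM (what is proved, stated in full; the proofs are below) =====
def Claim_equal_find_connected_airports : Prop := ∀ (airport : String) (routes : List (String × String)) (result : List String), Dom_find_connected_airports airport routes result → Spec_find_connected_airports airport routes result (find_connected_airports airport routes result)

-- ===== LEMMAS AND PROOFS =====

-- ---- proof-only helper definitions ----

-- destinations adjacent to u, in route order
def pvAdjL (routes : List (String × String)) (u : String) : List String :=
  (routes.filter (fun r => r.1 == u)).map Prod.snd

-- distinct destinations
def pvDests (routes : List (String × String)) : List String :=
  PySem.List.dedup (routes.map Prod.snd)

-- number of distinct destinations not yet in res (A's recursion measure)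
def pvMu (routes : List (String × String)) (res : List String) : Nat :=
  (pvDests routes).countP (fun x => !(res.contains x))

-- B's loop measure
def pvPhi (routes : List (String × String)) (seen st : List String) : Nat :=
  pvMu routes seen * (routes.length + 1) + st.length

-- first occurrences of l that are new relative to acc
def pvNew : List String → List String → List String
  | _, [] => []
  | acc, x :: t => if acc.contains x then pvNew acc t else x :: pvNew (acc ++ [x]) t

-- A's loop with only the destinations kept (pvLoopA forgets the sources)
def pvLoopAS (routes : List (String × String)) (f : Nat) : List String → List String → List String
  | [], res => res
  | d :: rest, res => pvLoopAS routes f rest (pvGoA routes f d (res ++ [d]))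

-- membership agreement between B's seen set and A's result list
def pvRel (seen res : List String) : Prop := ∀ x : String, x ∈ seen ↔ x ∈ res

-- the induction package: everything pvGoA at fuel f guarantees
def pvGoodA (routes : List (String × String)) (f : Nat) : Prop :=
  ∀ u res, pvMu routes res < f →
    ∃ apps,
      pvGoA routes f u res = res ++ apps ∧
      (∀ x ∈ apps, x ∈ routes.map Prod.snd) ∧
      (∀ x ∈ apps, x ∉ res) ∧
      (∀ x ∈ pvAdjL routes u, x ∈ res ++ apps) ∧
      (∀ d ∈ apps, ∀ y ∈ pvAdjL routes d, y ∈ res ++ apps) ∧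
      (∀ seen, pvRel seen res →
        ∃ seen₂, pvRel seen₂ (res ++ apps) ∧
          ∀ out st fb g, (∀ x ∈ st, x ∈ routes.map Prod.snd) →
            pvPhi routes seen (pvAdjL routes u ++ st) < fb →
            pvPhi routes seen₂ st < g →
            pvLoopB (pvAdjDict routes) fb seen out (pvAdjL routes u ++ st)
              = pvLoopB (pvAdjDict routes) g seen₂ (out ++ pvNew res apps) st)

-- ---- small list lemmas ----

lemma pvContains_iff {l : List String} {x : String} : l.contains x = true ↔ x ∈ l :=
  List.contains_iff_mem

lemma pvContains_false_iff {l : List String} {x : String} : l.contains x = false ↔ x ∉ l := by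
  rw [← Bool.not_eq_true, pvContains_iff]

lemma pvNew_cons_pos {acc : List String} {x : String} (t : List String) (hx : x ∈ acc) :
    pvNew acc (x :: t) = pvNew acc t := by
  simp only [pvNew]; rw [if_pos (pvContains_iff.mpr hx)]

lemma pvNew_cons_neg {acc : List String} {x : String} (t : List String) (hx : x ∉ acc) :
    pvNew acc (x :: t) = x :: pvNew (acc ++ [x]) t := by
  simp only [pvNew]; rw [if_neg (fun h => hx (pvContains_iff.mp h))]

lemma pvSetAdd_pos {acc : List String} {x : String} (hx : x ∈ acc) :
    PySem.Set.add acc x = acc := by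
  unfold PySem.Set.add PySem.Set.contains
  rw [if_pos (pvContains_iff.mpr hx)]

lemma pvSetAdd_neg {acc : List String} {x : String} (hx : x ∉ acc) :
    PySem.Set.add acc x = acc ++ [x] := by
  unfold PySem.Set.add PySem.Set.contains
  rw [if_neg (fun h => hx (pvContains_iff.mp h))]

lemma pvCountP_lt {p q : String → Bool} (l : List String) (d : String) (hd : d ∈ l)
    (hpd : p d = true) (hqd : q d = false) (himp : ∀ x, q x = true → p x = true) :
    l.countP q < l.countP p := by
  induction l with
  | nil => cases hd
  | cons a t ih =>
    rcases List.mem_cons.mp hd with h | h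
    · subst h
      have hmono := List.countP_mono_left (l := t) (p := q) (q := p) (fun x _ hx => himp x hx)
      simp [List.countP_cons, hpd, hqd]
      omega
    · have hlt := ih h
      by_cases hqa : q a = true
      · simp [List.countP_cons, hqa, himp a hqa]
        omega
      · simp only [Bool.not_eq_true] at hqa
        simp [List.countP_cons, hqa]
        split <;> omega

lemma pvMu_le_of_subset {routes : List (String × String)} {r₁ r₂ : List String}
    (h : ∀ x ∈ r₁, x ∈ r₂) : pvMu routes r₂ ≤ pvMu routes r₁ := by
  apply List.countP_mono_left
  intro a _ ha
  simp only [Bool.not_eq_true', pvContains_false_iff] at ha ⊢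
  exact fun hmem => ha (h a hmem)

lemma pvMu_lt {routes : List (String × String)} {r : List String} {d : String}
    (hd : d ∈ routes.map Prod.snd) (hnr : d ∉ r) : pvMu routes (r ++ [d]) < pvMu routes r := by
  apply pvCountP_lt _ d
  · simpa [pvDests] using hd
  · simpa [pvContains_false_iff]
  · simp
  · intro x hx
    simp only [Bool.not_eq_true', pvContains_false_iff, List.mem_append] at hx ⊢
    exact fun hmem => hx (Or.inl hmem)

lemma pvMu_le_length (routes : List (String × String)) (res : List String) :
    pvMu routes res ≤ (pvDests routes).length := by
  unfold pvMu; exact List.countP_le_length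

lemma pvNew_length_le (acc l : List String) : (pvNew acc l).length ≤ l.length := by
  induction l generalizing acc with
  | nil => simp [pvNew]
  | cons x t ih =>
    simp only [pvNew]
    split
    · exact Nat.le_trans (ih acc) (Nat.le_succ _)
    · simpa using ih (acc ++ [x])

lemma pvAdjL_length_le (routes : List (String × String)) (u : String) :
    (pvAdjL routes u).length ≤ routes.length := by
  simpa [pvAdjL] using List.length_filter_le _ routes

lemma pvAdjL_subset {routes : List (String × String)} {u x : String}
    (h : x ∈ pvAdjL routes u) : x ∈ routes.map Prod.snd := by
  simp only [pvAdjL, List.mem_map] at h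
  obtain ⟨r, hr, hx⟩ := h
  exact List.mem_map.mpr ⟨r, (List.mem_filter.mp hr).1, hx⟩

-- ---- pvNew lemmas ----

lemma pvNew_congr {acc acc' : List String} (l : List String)
    (h : ∀ y : String, y ∈ acc ↔ y ∈ acc') : pvNew acc l = pvNew acc' l := by
  induction l generalizing acc acc' with
  | nil => rfl
  | cons x t ih =>
    by_cases hx : x ∈ acc
    · rw [pvNew_cons_pos t hx, pvNew_cons_pos t ((h x).mp hx)]
      exact ih h
    · rw [pvNew_cons_neg t hx, pvNew_cons_neg t (fun hx' => hx ((h x).mpr hx'))]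
      refine congrArg _ (ih ?_)
      intro y; simp only [List.mem_append, List.mem_singleton]
      exact or_congr (h y) Iff.rfl

lemma pvNew_append (acc l₁ l₂ : List String) :
    pvNew acc (l₁ ++ l₂) = pvNew acc l₁ ++ pvNew (acc ++ l₁) l₂ := by
  induction l₁ generalizing acc with
  | nil => simp [pvNew]
  | cons x t ih =>
    by_cases hx : x ∈ acc
    · rw [List.cons_append, pvNew_cons_pos _ hx, pvNew_cons_pos _ hx, ih acc]
      refine congrArg _ (pvNew_congr _ ?_)
      intro y
      simp only [List.mem_append, List.mem_cons]
      constructor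
      · rintro (h | h) <;> tauto
      · rintro (h | h | h) <;> first | tauto | (subst h; exact Or.inl hx)
    · rw [List.cons_append, pvNew_cons_neg _ hx, pvNew_cons_neg _ hx, ih (acc ++ [x])]
      simp

-- ---- PySem.Set.ofList as pvNew ----

lemma pvFoldl_add_eq (l acc : List String) :
    l.foldl PySem.Set.add acc = acc ++ pvNew acc l := by
  induction l generalizing acc with
  | nil => simp [pvNew]
  | cons x t ih =>
    by_cases hx : x ∈ acc
    · rw [List.foldl_cons, pvSetAdd_pos hx, pvNew_cons_pos _ hx]
      exact ih acc
    · rw [List.foldl_cons, pvSetAdd_neg hx, pvNew_cons_neg _ hx, ih (acc ++ [x])]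
      simp

lemma pvOfList_eq (l : List String) : PySem.Set.ofList l = pvNew [] l := by
  rw [PySem.Set.ofList_eq_foldl, pvFoldl_add_eq]
  simp

-- dropping a later duplicate does not change set()
lemma pvOfList_dup (r t : List String) (x : String) (p : String → Bool) (hx : x ∈ r) :
    PySem.Set.ofList ((r ++ x :: t).filter p) = PySem.Set.ofList ((r ++ t).filter p) := by
  by_cases hp : p x = true
  · have hxf : x ∈ r.filter p := List.mem_filter.mpr ⟨hx, hp⟩
    rw [List.filter_append, List.filter_append, List.filter_cons_of_pos hp,
      pvOfList_eq, pvOfList_eq, pvNew_append, pvNew_append]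
    simp only [List.nil_append]
    congr 1
    exact pvNew_cons_pos _ hxf
  · rw [List.filter_append, List.filter_append, List.filter_cons_of_neg (by simp [hp])]

lemma pvOfList_new (p : String → Bool) : ∀ (l r : List String),
    PySem.Set.ofList ((r ++ pvNew r l).filter p) = PySem.Set.ofList ((r ++ l).filter p) := by
  intro l
  induction l with
  | nil => intro r; simp [pvNew]
  | cons x t ih =>
    intro r
    by_cases hx : x ∈ r
    · rw [pvNew_cons_pos _ hx, ih r, pvOfList_dup r t x p hx]
    · rw [pvNew_cons_neg _ hx]
      have h1 : r ++ x :: pvNew (r ++ [x]) t = (r ++ [x]) ++ pvNew (r ++ [x]) t := by simp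
      have h2 : r ++ x :: t = (r ++ [x]) ++ t := by simp
      rw [h1, h2, ih (r ++ [x])]

-- ---- adjacency dict lemma ----

lemma pvAdjDict_getD_aux (u : String) : ∀ (routes : List (String × String)) (d : PySem.Dict String (List String)),
    (routes.foldl (fun adj r => adj.insert r.1 (adj.getD r.1 [] ++ [r.2])) d).getD u []
      = d.getD u [] ++ pvAdjL routes u := by
  intro routes
  induction routes with
  | nil => intro d; simp [pvAdjL]
  | cons r t ih =>
    intro d
    rw [List.foldl_cons, ih]
    by_cases h : u = r.1
    · subst h
      rw [PySem.Dict.getD_insert, if_pos rfl]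
      simp [pvAdjL]
    · rw [PySem.Dict.getD_insert, if_neg h]
      have hne : (r.1 == u) = false := beq_eq_false_iff_ne.mpr (fun e => h e.symm)
      simp [pvAdjL, hne]

lemma pvAdjDict_getD (routes : List (String × String)) (u : String) :
    (pvAdjDict routes).getD u [] = pvAdjL routes u := by
  rw [pvAdjDict, pvAdjDict_getD_aux]
  simp

-- ---- pvLoopB fuel lemmas ----

lemma pvLoopB_nil (adj : PySem.Dict String (List String)) (f : Nat) (seen : PySem.Set String)
    (out : List String) : pvLoopB adj f seen out [] = out := by
  cases f <;> rfl

lemma pvPhi_skip (routes : List (String × String)) (seen : List String) (u : String)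
    (rest : List String) : pvPhi routes seen (u :: rest) = pvPhi routes seen rest + 1 := by
  simp only [pvPhi, List.length_cons]; omega

lemma pvPhi_mark_lt {routes : List (String × String)} {seen : List String} {u : String}
    (rest : List String) (hu : u ∈ routes.map Prod.snd) (hnotin : u ∉ seen) :
    pvPhi routes (seen ++ [u]) (pvAdjL routes u ++ rest) < pvPhi routes seen (u :: rest) := by
  have h1 := pvMu_lt (routes := routes) hu hnotin
  have h2 : (pvMu routes (seen ++ [u]) + 1) * (routes.length + 1)
      ≤ pvMu routes seen * (routes.length + 1) := Nat.mul_le_mul_right _ (by omega)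
  have h3 := pvAdjL_length_le routes u
  rw [Nat.succ_mul] at h2
  simp only [pvPhi, List.length_append, List.length_cons]
  omega

lemma pvLoopB_fuel (routes : List (String × String)) : ∀ (f₁ : Nat) (f₂ : Nat)
    (seen : List String) (out st : List String),
    (∀ x ∈ st, x ∈ routes.map Prod.snd) →
    pvPhi routes seen st < f₁ → pvPhi routes seen st < f₂ →
    pvLoopB (pvAdjDict routes) f₁ seen out st = pvLoopB (pvAdjDict routes) f₂ seen out st := by
  intro f₁
  induction f₁ with
  | zero => intro f₂ seen out st _ h1 _; exact absurd h1 (Nat.not_lt_zero _)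
  | succ a ih =>
    intro f₂ seen out st hok h1 h2
    cases st with
    | nil => rw [pvLoopB_nil, pvLoopB_nil]
    | cons u rest =>
      obtain ⟨b, rfl⟩ : ∃ b, f₂ = b + 1 := ⟨f₂ - 1, by omega⟩
      rw [pvPhi_skip] at h1 h2
      by_cases hu : u ∈ seen
      · have hc : PySem.Set.contains seen u = true := pvContains_iff.mpr hu
        simp only [pvLoopB]
        rw [if_pos hc, if_pos hc]
        exact ih b seen out rest (fun x hx => hok x (List.mem_cons_of_mem _ hx))
          (by omega) (by omega)
      · have hc : ¬ (PySem.Set.contains seen u = true) := fun h => hu (pvContains_iff.mp h)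
        simp only [pvLoopB]
        rw [if_neg hc, if_neg hc, pvSetAdd_neg hu, pvAdjDict_getD]
        have hmark := pvPhi_mark_lt (routes := routes) (seen := seen) rest
          (hok u (List.mem_cons_self)) hu
        rw [pvPhi_skip] at hmark
        exact ih b (seen ++ [u]) (out ++ [u]) (pvAdjL routes u ++ rest)
          (fun x hx => (List.mem_append.mp hx).elim
            (fun h => pvAdjL_subset h)
            (fun h => hok x (List.mem_cons_of_mem _ h)))
          (by omega) (by omega)

-- ---- A-side restatement lemmas ----

lemma pvLoopA_eq_AS (routes : List (String × String)) (f : Nat) :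
    ∀ (l : List (String × String)) (res : List String),
    pvLoopA routes f l res = pvLoopAS routes f (l.map Prod.snd) res := by
  intro l
  induction l with
  | nil => intro res; rw [pvLoopA]; rfl
  | cons r t ih => intro res; cases r; rw [pvLoopA]; simp [pvLoopAS, ih]

lemma pvImm_map_snd (routes : List (String × String)) (u : String) (res : List String) :
    (routes.filter (fun r => r.1 == u && !(res.contains r.2))).map Prod.snd
      = (pvAdjL routes u).filter (fun d => !(res.contains d)) := by
  rw [pvAdjL, List.filter_map, List.filter_filter]
  simp [Function.comp, Bool.and_comm]

lemma pvGoA_succ_eq (routes : List (String × String)) (f : Nat) (u : String) (res : List String) :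
    pvGoA routes (f + 1) u res
      = pvLoopAS routes f ((pvAdjL routes u).filter (fun d => !(res.contains d))) res := by
  rw [pvGoA, ← pvImm_map_snd routes u res, ← pvLoopA_eq_AS]
  set imm := routes.filter (fun r => r.1 == u && !(res.contains r.2)) with himm
  by_cases h : imm = []
  · simp [h, pvLoopA]
  · have : imm.length > 0 := List.length_pos_iff.mpr h
    simp [this]

-- ---- the main simulation ----

lemma pvLoopGood (routes : List (String × String)) (f : Nat) (hA : pvGoodA routes f)
    (res0 : List String) (hμ0 : pvMu routes res0 ≤ f) :
    ∀ (ds : List String) (res' : List String),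
    (∀ x ∈ ds, x ∈ routes.map Prod.snd) →
    (∀ x ∈ res0, x ∈ res') →
    (∀ x ∈ res', x ∈ res0 ∨ ∀ y ∈ pvAdjL routes x, y ∈ res') →
    ∃ apps,
      pvLoopAS routes f (ds.filter (fun d => !(res0.contains d))) res' = res' ++ apps ∧
      (∀ x ∈ apps, x ∈ routes.map Prod.snd) ∧
      (∀ x ∈ apps, x ∉ res0) ∧
      (∀ x ∈ ds, x ∈ res' ++ apps) ∧
      (∀ x ∈ res' ++ apps, x ∈ res0 ∨ ∀ y ∈ pvAdjL routes x, y ∈ res' ++ apps) ∧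
      (∀ seen, pvRel seen res' →
        ∃ seen₂, pvRel seen₂ (res' ++ apps) ∧
          ∀ out st fb g, (∀ x ∈ st, x ∈ routes.map Prod.snd) →
            pvPhi routes seen (ds ++ st) < fb → pvPhi routes seen₂ st < g →
            pvLoopB (pvAdjDict routes) fb seen out (ds ++ st)
              = pvLoopB (pvAdjDict routes) g seen₂ (out ++ pvNew res' apps) st) := by
  intro ds
  induction ds with
  | nil =>
    intro res' _ _ hclosed
    refine ⟨[], by simp [pvLoopAS], by simp, by simp, by simp, by simpa using hclosed, ?_⟩
    intro seen hrel
    refine ⟨seen, by simpa using hrel, ?_⟩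
    intro out st fb g hstok h1 h2
    simp only [List.nil_append] at h1 ⊢
    rw [show pvNew res' [] = [] from rfl, List.append_nil]
    exact pvLoopB_fuel routes fb g seen out st hstok h1 h2
  | cons d ds' ih =>
    intro res' hds hsub hclosed
    have hd_snd : d ∈ routes.map Prod.snd := hds d List.mem_cons_self
    have hds' : ∀ x ∈ ds', x ∈ routes.map Prod.snd := fun x hx => hds x (List.mem_cons_of_mem _ hx)
    by_cases hd0 : d ∈ res0
    -- CASE skip: d ∈ res0 (A's snapshot filtered it out; B pops it and skips)
    · have hfilter : (d :: ds').filter (fun x => !(res0.contains x))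
          = ds'.filter (fun x => !(res0.contains x)) := by
        rw [List.filter_cons_of_neg (by simpa using hd0)]
      obtain ⟨apps, hAS, hsnd, hnot, hmem, hcl, hBB⟩ := ih res' hds' hsub hclosed
      refine ⟨apps, by rw [hfilter]; exact hAS, hsnd, hnot, ?_, hcl, ?_⟩
      · intro x hx
        rcases List.mem_cons.mp hx with rfl | hx
        · exact List.mem_append.mpr (Or.inl (hsub x hd0))
        · exact hmem x hx
      · intro seen hrel
        obtain ⟨seen₂, hrel₂, hstep⟩ := hBB seen hrel
        refine ⟨seen₂, hrel₂, ?_⟩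
        intro out st fb g hstok h1 h2
        rw [List.cons_append, pvPhi_skip] at h1
        obtain ⟨a, rfl⟩ : ∃ a, fb = a + 1 := ⟨fb - 1, by omega⟩
        have hc : PySem.Set.contains seen d = true :=
          pvContains_iff.mpr ((hrel d).mpr (hsub d hd0))
        rw [List.cons_append]
        simp only [pvLoopB]
        rw [if_pos hc]
        exact hstep out st a g hstok (by omega) h2
    · have hfilter : (d :: ds').filter (fun x => !(res0.contains x))
          = d :: ds'.filter (fun x => !(res0.contains x)) := by
        rw [List.filter_cons_of_pos (by simpa using hd0)]
      have hdDests : d ∈ pvDests routes := by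
        rw [pvDests]
        exact (PySem.List.mem_dedup _ _).mpr hd_snd
      have hμpos : 1 ≤ pvMu routes res0 := by
        have : 0 < (pvDests routes).countP (fun x => !(res0.contains x)) :=
          List.countP_pos_iff.mpr ⟨d, hdDests, by simpa using hd0⟩
        simpa [pvMu] using this
      have hfpos : 1 ≤ f := Nat.le_trans hμpos hμ0
      by_cases hdres : d ∈ res'
      -- CASE dup: d already reached earlier in this loop; A re-appends and recurses,
      -- but the recursive call is a no-op because d's neighbours are all in res'
      · have hclosedd : ∀ y ∈ pvAdjL routes d, y ∈ res' := by
          rcases hclosed d hdres with h | h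
          · exact absurd h hd0
          · exact h
        obtain ⟨f', rfl⟩ : ∃ f', f = f' + 1 := ⟨f - 1, by omega⟩
        have hchild : pvGoA routes (f' + 1) d (res' ++ [d]) = res' ++ [d] := by
          rw [pvGoA_succ_eq]
          rw [show (pvAdjL routes d).filter (fun y => !((res' ++ [d]).contains y)) = [] from by
            apply List.filter_eq_nil_iff.mpr
            intro y hy
            have h := hclosedd y hy
            simp [h]]
          rfl
        have hsub'' : ∀ x ∈ res0, x ∈ res' ++ [d] :=
          fun x hx => List.mem_append.mpr (Or.inl (hsub x hx))
        have hclosed'' : ∀ x ∈ res' ++ [d], x ∈ res0 ∨ ∀ y ∈ pvAdjL routes x, y ∈ res' ++ [d] := by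
          intro x hx
          rcases List.mem_append.mp hx with hx | hx
          · rcases hclosed x hx with h | h
            · exact Or.inl h
            · exact Or.inr (fun y hy => List.mem_append.mpr (Or.inl (h y hy)))
          · rcases List.mem_singleton.mp hx with rfl
            exact Or.inr (fun y hy => List.mem_append.mpr (Or.inl (hclosedd y hy)))
        obtain ⟨apps', hAS, hsnd, hnot, hmem, hcl, hBB⟩ := ih (res' ++ [d]) hds' hsub'' hclosed''
        have hre : res' ++ d :: apps' = (res' ++ [d]) ++ apps' := by simp
        refine ⟨d :: apps', ?_, ?_, ?_, ?_, ?_, ?_⟩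
        · rw [hfilter]
          show pvLoopAS routes (f' + 1) _ (pvGoA routes (f' + 1) d (res' ++ [d])) = _
          rw [hchild, hAS, hre]
        · intro x hx
          rcases List.mem_cons.mp hx with rfl | hx
          · exact hd_snd
          · exact hsnd x hx
        · intro x hx
          rcases List.mem_cons.mp hx with rfl | hx
          · exact hd0
          · exact hnot x hx
        · intro x hx
          rw [hre]
          rcases List.mem_cons.mp hx with rfl | hx
          · exact List.mem_append.mpr (Or.inl (List.mem_append.mpr (Or.inr (List.mem_singleton_self _))))
          · exact hmem x hx
        · rw [hre]; exact hcl
        · intro seen hrel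
          have hrel'' : pvRel seen (res' ++ [d]) := by
            intro x
            rw [hrel x]
            constructor
            · exact fun h => List.mem_append.mpr (Or.inl h)
            · intro h
              rcases List.mem_append.mp h with h | h
              · exact h
              · rcases List.mem_singleton.mp h with rfl; exact hdres
          obtain ⟨seen₂, hrel₂, hstep⟩ := hBB seen hrel''
          refine ⟨seen₂, by rw [hre]; exact hrel₂, ?_⟩
          intro out st fb g hstok h1 h2
          rw [List.cons_append, pvPhi_skip] at h1
          obtain ⟨a, rfl⟩ : ∃ a, fb = a + 1 := ⟨fb - 1, by omega⟩
          have hc : PySem.Set.contains seen d = true := pvContains_iff.mpr ((hrel d).mpr hdres)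
          rw [List.cons_append]
          simp only [pvLoopB]
          rw [if_pos hc]
          have ht : pvNew res' (d :: apps') = pvNew (res' ++ [d]) apps' := by
            rw [pvNew_cons_pos _ hdres]
            apply pvNew_congr
            intro y
            constructor
            · exact fun h => List.mem_append.mpr (Or.inl h)
            · intro h
              rcases List.mem_append.mp h with h | h
              · exact h
              · rcases List.mem_singleton.mp h with rfl; exact hdres
          rw [ht]
          exact hstep out st a g hstok (by omega) h2
      -- CASE fresh: d is new; A appends it and recurses; B marks it and pushes its adj list
      · have hμc : pvMu routes (res' ++ [d]) < f := by
          have hle : pvMu routes (res' ++ [d]) ≤ pvMu routes (res0 ++ [d]) := by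
            apply pvMu_le_of_subset
            intro x hx
            rcases List.mem_append.mp hx with hx | hx
            · exact List.mem_append.mpr (Or.inl (hsub x hx))
            · exact List.mem_append.mpr (Or.inr hx)
          have hlt := pvMu_lt (routes := routes) hd_snd hd0
          omega
        obtain ⟨apps_c, hcEq, hc_snd, hc_not, hc_P1, hc_P2, hc_B⟩ := hA d (res' ++ [d]) hμc
        have hsub_c : ∀ x ∈ res0, x ∈ (res' ++ [d]) ++ apps_c :=
          fun x hx => List.mem_append.mpr (Or.inl (List.mem_append.mpr (Or.inl (hsub x hx))))
        have hclosed_c : ∀ x ∈ (res' ++ [d]) ++ apps_c,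
            x ∈ res0 ∨ ∀ y ∈ pvAdjL routes x, y ∈ (res' ++ [d]) ++ apps_c := by
          intro x hx
          rcases List.mem_append.mp hx with hx | hx
          · rcases List.mem_append.mp hx with hx | hx
            · rcases hclosed x hx with h | h
              · exact Or.inl h
              · exact Or.inr (fun y hy =>
                  List.mem_append.mpr (Or.inl (List.mem_append.mpr (Or.inl (h y hy)))))
            · rcases List.mem_singleton.mp hx with rfl
              exact Or.inr hc_P1
          · exact Or.inr (hc_P2 x hx)
        obtain ⟨apps_r, hrAS, hr_snd, hr_not, hr_mem, hr_cl, hr_B⟩ :=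
          ih ((res' ++ [d]) ++ apps_c) hds' hsub_c hclosed_c
        have hre : res' ++ d :: (apps_c ++ apps_r) = ((res' ++ [d]) ++ apps_c) ++ apps_r := by simp
        refine ⟨d :: (apps_c ++ apps_r), ?_, ?_, ?_, ?_, ?_, ?_⟩
        · rw [hfilter]
          obtain ⟨f', rfl⟩ : ∃ f', f = f' + 1 := ⟨f - 1, by omega⟩
          show pvLoopAS routes (f' + 1) _ (pvGoA routes (f' + 1) d (res' ++ [d])) = _
          rw [hcEq, hrAS, hre]
        · intro x hx
          rcases List.mem_cons.mp hx with rfl | hx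
          · exact hd_snd
          · rcases List.mem_append.mp hx with hx | hx
            · exact hc_snd x hx
            · exact hr_snd x hx
        · intro x hx
          rcases List.mem_cons.mp hx with rfl | hx
          · exact hd0
          · rcases List.mem_append.mp hx with hx | hx
            · exact fun h0 => hc_not x hx (List.mem_append.mpr (Or.inl (hsub x h0)))
            · exact hr_not x hx
        · intro x hx
          rw [hre]
          rcases List.mem_cons.mp hx with rfl | hx
          · exact List.mem_append.mpr (Or.inl (List.mem_append.mpr
              (Or.inl (List.mem_append.mpr (Or.inr (List.mem_singleton_self _))))))
          · exact hr_mem x hx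
        · rw [hre]; exact hr_cl
        · intro seen hrel
          have hrel' : pvRel (seen ++ [d]) (res' ++ [d]) := by
            intro x
            simp only [List.mem_append, List.mem_singleton]
            exact or_congr (hrel x) Iff.rfl
          obtain ⟨seen_c, hrel_c, hstep_c⟩ := hc_B (seen ++ [d]) hrel'
          obtain ⟨seen₂, hrel₂, hstep_r⟩ := hr_B seen_c hrel_c
          refine ⟨seen₂, by rw [hre]; exact hrel₂, ?_⟩
          intro out st fb g hstok h1 h2
          rw [List.cons_append, pvPhi_skip] at h1
          obtain ⟨a, rfl⟩ : ∃ a, fb = a + 1 := ⟨fb - 1, by omega⟩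
          have hdnotseen : d ∉ seen := fun h => hdres ((hrel d).mp h)
          have hc : ¬ (PySem.Set.contains seen d = true) :=
            fun h => hdnotseen (pvContains_iff.mp h)
          rw [List.cons_append]
          simp only [pvLoopB]
          rw [if_neg hc, pvSetAdd_neg hdnotseen, pvAdjDict_getD]
          have hstok' : ∀ x ∈ ds' ++ st, x ∈ routes.map Prod.snd := by
            intro x hx
            rcases List.mem_append.mp hx with hx | hx
            · exact hds' x hx
            · exact hstok x hx
          have hmark := pvPhi_mark_lt (routes := routes) (seen := seen) (ds' ++ st) hd_snd hdnotseen
          rw [pvPhi_skip] at hmark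
          rw [hstep_c (out ++ [d]) (ds' ++ st) a (pvPhi routes seen_c (ds' ++ st) + 1)
            hstok' (by omega) (Nat.lt_succ_self _)]
          rw [hstep_r (out ++ [d] ++ pvNew (res' ++ [d]) apps_c) st
            (pvPhi routes seen_c (ds' ++ st) + 1) g hstok (Nat.lt_succ_self _) h2]
          congr 1
          rw [pvNew_cons_neg _ hdres, pvNew_append]
          simp

lemma pvGoodA_all (routes : List (String × String)) : ∀ f, pvGoodA routes f := by
  intro f
  induction f with
  | zero => intro u res h; exact absurd h (Nat.not_lt_zero _)
  | succ f ihf =>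
    intro u res hμ
    obtain ⟨apps, hAS, hsnd, hnot, hmem, hclosed, hBB⟩ :=
      pvLoopGood routes f ihf res (Nat.lt_succ_iff.mp hμ) (pvAdjL routes u) res
        (fun x hx => pvAdjL_subset hx) (fun x hx => hx) (fun x hx => Or.inl hx)
    refine ⟨apps, ?_, hsnd, hnot, hmem, ?_, hBB⟩
    · rw [pvGoA_succ_eq]; exact hAS
    · intro d hd y hy
      rcases hclosed d (List.mem_append.mpr (Or.inr hd)) with h | h
      · exact absurd h (hnot d hd)
      · exact h y hy

-- ===== VERDICT (by name: the statement is the Claim_ definition above) =====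
lemma pvDests_length_le (routes : List (String × String)) :
    (pvDests routes).length ≤ routes.length := by
  have h : pvDests routes = pvNew [] (routes.map Prod.snd) := by
    rw [pvDests, PySem.List.dedup_eq_ofList, pvOfList_eq]
  rw [h]
  exact Nat.le_trans (pvNew_length_le _ _) (by simp)

theorem find_connected_airports_spec : Claim_equal_find_connected_airports := by
  intro airport routes result _dom
  unfold Spec_find_connected_airports
  -- A side
  have hμ : pvMu routes result < (pvDests routes).length + 1 :=
    Nat.lt_succ_of_le (pvMu_le_length routes result)
  obtain ⟨apps, hEq, _, _, _, _, hB⟩ := pvGoodA_all routes ((pvDests routes).length + 1)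
    airport result hμ
  -- B side: seen₀ = set(result)
  have hrel0 : pvRel (PySem.Set.ofList result) result := by
    intro x; exact PySem.Set.mem_ofList result x
  obtain ⟨seen₂, _, hstep⟩ := hB (PySem.Set.ofList result) hrel0
  -- fuel bound for B
  have hmu0 : pvMu routes (PySem.Set.ofList result) ≤ routes.length :=
    Nat.le_trans (pvMu_le_length _ _) (pvDests_length_le routes)
  have hphi : pvPhi routes (PySem.Set.ofList result) (pvAdjL routes airport ++ [])
      < (routes.length + 1) * (routes.length + 1) := by
    have h1 : pvMu routes (PySem.Set.ofList result) * (routes.length + 1)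
        ≤ routes.length * (routes.length + 1) := Nat.mul_le_mul_right _ hmu0
    have h2 := pvAdjL_length_le routes airport
    have h3 : (routes.length + 1) * (routes.length + 1)
        = routes.length * (routes.length + 1) + (routes.length + 1) := by ring
    simp only [pvPhi, List.length_append, List.length_nil]
    omega
  have hloop := hstep [] [] ((routes.length + 1) * (routes.length + 1))
    (pvPhi routes seen₂ [] + 1) (by intro x hx; cases hx) (by simpa using hphi)
    (Nat.lt_succ_self _)
  rw [List.append_nil] at hloop
  rw [pvLoopB_nil] at hloop
  -- assemble
  simp only [find_connected_airports, find_connected_airports_alt]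
  rw [pvAdjDict_getD, hloop]
  simp only [List.nil_append]
  have hA : pvGoA routes ((PySem.List.dedup (routes.map Prod.snd)).length + 1) airport result
      = result ++ apps := hEq
  rw [hA, pvOfList_new]
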